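-- pv_equiv track=rewrite | github.com/jrh-dev/AdventOfCode2024 | d02.py | valid_asc
-- ===== SOURCE A (Python) =====
-- from typing import List
--
-- def valid_asc(seq: List[int], tolerence: int, allow_skip: bool) -> bool:
--     for i in range(1, len(seq)):
--         if not (seq[i] > seq[i - 1] and seq[i] < (seq[i - 1] + tolerence + 1)):
--             if allow_skip:
--                 for i in range(0, len(seq)):
--                     adj_seq = seq[:]
--                     del adj_seq[i]
--                     if valid_asc(adj_seq, tolerence, False):
--                         return True
--             return False
--     return True
-- ===== SOURCE B (Python) =====
-- def _first_violation(seq, tolerence):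
--     """Index k of the first adjacent pair (k, k+1) out of order/tolerance, else None."""
--     if not seq:
--         return None
--     it = iter(seq)
--     a = next(it)
--     for k, b in enumerate(it):
--         if a < b <= a + tolerence:
--             a = b
--         else:
--             return k
--     return None
--
-- def valid_asc(seq, tolerence, allow_skip):
--     i = _first_violation(seq, tolerence)
--     if i is None:
--         return True
--     if not allow_skip:
--         return False
--     # only deleting one endpoint of the violating pair can possibly help
--     return any(_first_violation(seq[:j] + seq[j + 1:], tolerence) is None
--                for j in (i, i + 1))
-- ===== Notes on version B (the rewrite author's own statement) =====
-- stated objective: alternative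
-- what changed: Instead of retrying a full validity check after deleting every one of the n indices, B scans the adjacent pairs once and, at the first violating pair (i, i+1), tests only the two deletions (i or i+1) that could possibly repair it.
import Mathlib
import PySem

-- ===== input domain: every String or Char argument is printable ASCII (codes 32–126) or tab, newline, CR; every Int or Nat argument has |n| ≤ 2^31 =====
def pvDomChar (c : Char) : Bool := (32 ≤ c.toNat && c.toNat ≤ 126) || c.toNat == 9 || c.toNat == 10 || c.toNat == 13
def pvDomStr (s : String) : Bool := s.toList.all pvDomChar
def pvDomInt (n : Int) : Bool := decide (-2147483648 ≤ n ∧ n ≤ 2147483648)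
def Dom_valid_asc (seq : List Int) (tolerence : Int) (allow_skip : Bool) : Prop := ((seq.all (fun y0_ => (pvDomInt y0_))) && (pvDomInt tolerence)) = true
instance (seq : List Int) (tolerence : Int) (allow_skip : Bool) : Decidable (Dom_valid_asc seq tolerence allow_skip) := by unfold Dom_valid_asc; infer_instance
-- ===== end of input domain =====

-- B replaces A's "retry a full check after deleting every index" fallback by a single forward
-- scan that, at the first violating adjacent pair (i, i+1), tests only the two deletions (i or
-- i+1) that can repair it (objective: alternative).

-- ===== PORT A =====
-- seq[i] for an index produced by range(...) (always in range, so the default 0 is never used)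
def pvIdxA (seq : List Int) (i : Int) : Int := (PySem.List.pyGet? seq i).getD 0

-- the loop condition 'seq[i] > seq[i-1] and seq[i] < seq[i-1] + tolerence + 1'
def okA (seq : List Int) (tolerence : Int) (i : Int) : Bool :=
  decide (pvIdxA seq i > pvIdxA seq (i - 1)) &&
  decide (pvIdxA seq i < pvIdxA seq (i - 1) + tolerence + 1)

-- the outer 'for i in range(1, len(seq))' loop: first violation returns fallback, else True.
-- (The value returned at a violation does not depend on i, so it is passed in as 'fallback'.)
def goA (seq : List Int) (tolerence : Int) (fallback : Bool) : List Int → Bool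
  | [] => true
  | i :: rest => if okA seq tolerence i then goA seq tolerence fallback rest else fallback

-- 'for i in range(0, len(seq)): ... if valid_asc(adj_seq, tolerence, False): return True'.
-- The recursive call has allow_skip = False, so it is the outer loop with fallback False.
def valid_asc (seq : List Int) (tolerence : Int) (allow_skip : Bool) : Bool :=
  goA seq tolerence
    (if allow_skip then
      (PySem.List.pyRange 0 (seq.length : Int) 1).any (fun j =>
        let adj_seq := seq.eraseIdx j.toNat
        goA adj_seq tolerence false (PySem.List.pyRange 1 (adj_seq.length : Int) 1))
    else false)
    (PySem.List.pyRange 1 (seq.length : Int) 1)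

-- ===== PORT B =====
-- the 'for k, b in enumerate(seq[1:])' scan of _first_violation, carrying the previous value a
def goViol (tolerence : Int) (a : Int) : List Int → Option Nat
  | [] => none
  | b :: rest =>
    if decide (a < b) && decide (b ≤ a + tolerence) then
      (goViol tolerence b rest).map (· + 1)
    else some 0

-- _first_violation(seq, tolerence)  (len(seq) < 2 gives None: both [] and [a] fall to none)
def firstViolation (seq : List Int) (tolerence : Int) : Option Nat :=
  match seq with
  | [] => none
  | a :: rest => goViol tolerence a rest

def valid_asc_alt (seq : List Int) (tolerence : Int) (allow_skip : Bool) : Bool :=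
  match firstViolation seq tolerence with
  | none => true
  | some i =>
    if allow_skip then
      -- any(... for j in (i, i + 1)); seq[:j] + seq[j+1:] = seq.eraseIdx j
      (firstViolation (seq.eraseIdx i) tolerence).isNone ||
      (firstViolation (seq.eraseIdx (i + 1)) tolerence).isNone
    else false

-- ===== PRECONDITION & SPEC =====
def Spec_valid_asc (seq : List Int) (tolerence : Int) (allow_skip : Bool) (out : Bool) : Prop := out = valid_asc_alt seq tolerence allow_skip
instance (seq : List Int) (tolerence : Int) (allow_skip : Bool) (out : Bool) : Decidable (Spec_valid_asc seq tolerence allow_skip out) := by unfold Spec_valid_asc; infer_instance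

-- ===== CLAIM (what is proved, stated in full; the proofs are below) =====
def Claim_equal_valid_asc : Prop := ∀ (seq : List Int) (tolerence : Int) (allow_skip : Bool), Dom_valid_asc seq tolerence allow_skip → Spec_valid_asc seq tolerence allow_skip (valid_asc seq tolerence allow_skip)

-- ===== LEMMAS AND PROOFS =====

-- proof-side: "every adjacent pair of xs is ascending within tolerance"
def pairsOk (xs : List Int) (tol : Int) : Prop :=
  ∀ k (h : k + 1 < xs.length), xs[k]'(by omega) < xs[k+1]'h ∧ xs[k+1]'h ≤ xs[k]'(by omega) + tol

-- the outer loop returns True iff every index passes, else the fallback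
lemma goA_eq_all (seq : List Int) (tol : Int) (fb : Bool) (l : List Int) :
    goA seq tol fb l = if l.all (okA seq tol) then true else fb := by
  induction l with
  | nil => simp [goA]
  | cons i rest ih =>
    by_cases h : okA seq tol i = true <;> simp [goA, h, ih]

lemma pairsOk_cons (a b : Int) (rest : List Int) (tol : Int) :
    pairsOk (a :: b :: rest) tol ↔ (a < b ∧ b ≤ a + tol) ∧ pairsOk (b :: rest) tol := by
  constructor
  · intro h
    exact ⟨by simpa using h 0 (by simp), fun k hk => by simpa using h (k+1) (by simpa using hk)⟩
  · rintro ⟨hab, h⟩ k hk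
    cases k with
    | zero => simpa using hab
    | succ k => simpa using h k (by simpa using hk)

-- the scan returns none iff every pair of (a :: l) is ok
lemma goViol_none_iff (tol a : Int) (l : List Int) :
    goViol tol a l = none ↔ pairsOk (a :: l) tol := by
  induction l generalizing a with
  | nil =>
    simp only [goViol, true_iff]
    intro k hk; simp at hk
  | cons b rest ih =>
    rw [pairsOk_cons]
    by_cases h : (decide (a < b) && decide (b ≤ a + tol)) = true
    · simp only [goViol, h, if_true, Option.map_eq_none_iff, ih]
      simp only [Bool.and_eq_true, decide_eq_true_eq] at h
      exact ⟨fun p => ⟨h, p⟩, fun p => p.2⟩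
    · simp only [goViol, h, Bool.false_eq_true, if_false]
      simp only [Bool.and_eq_true, decide_eq_true_eq] at h
      constructor
      · intro hc; exact absurd hc (by simp)
      · rintro ⟨hab, -⟩; exact absurd hab h

lemma firstViolation_none_iff (xs : List Int) (tol : Int) :
    firstViolation xs tol = none ↔ pairsOk xs tol := by
  cases xs with
  | nil =>
    simp only [firstViolation, true_iff]
    intro k hk; simp at hk
  | cons a rest => exact goViol_none_iff tol a rest

-- the scan points at a genuinely violating pair
lemma goViol_some (tol a : Int) (l : List Int) (i : Nat)
    (h : goViol tol a l = some i) :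
    ∃ hi : i + 1 < (a :: l).length,
      ¬((a :: l)[i]'(by omega) < (a :: l)[i+1]'hi ∧
        (a :: l)[i+1]'hi ≤ (a :: l)[i]'(by omega) + tol) := by
  induction l generalizing a i with
  | nil => simp [goViol] at h
  | cons b rest ih =>
    by_cases hab : (decide (a < b) && decide (b ≤ a + tol)) = true
    · simp only [goViol, hab, if_true, Option.map_eq_some_iff] at h
      obtain ⟨j, hj, rfl⟩ := h
      obtain ⟨hlt, hv⟩ := ih b j hj
      refine ⟨by simpa using hlt, ?_⟩
      simpa using hv
    · simp only [goViol, hab, Bool.false_eq_true, if_false, Option.some.injEq] at h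
      subst h
      refine ⟨by simp, ?_⟩
      simp only [Bool.and_eq_true, decide_eq_true_eq] at hab
      simpa using hab

lemma firstViolation_some (xs : List Int) (tol : Int) (i : Nat)
    (h : firstViolation xs tol = some i) :
    ∃ hi : i + 1 < xs.length,
      ¬(xs[i]'(by omega) < xs[i+1]'hi ∧ xs[i+1]'hi ≤ xs[i]'(by omega) + tol) := by
  cases xs with
  | nil => simp [firstViolation] at h
  | cons a rest => exact goViol_some tol a rest i h

-- okA at an in-range index is the pair condition
lemma okA_iff (seq : List Int) (tol : Int) (k : Nat) (h : k + 1 < seq.length) :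
    okA seq tol ((k : Int) + 1) = true ↔
      (seq[k]'(by omega) < seq[k+1]'h ∧ seq[k+1]'h ≤ seq[k]'(by omega) + tol) := by
  have h0 : k < seq.length := by omega
  have e1 : PySem.List.pyGet? seq ((k : Int) + 1) = some (seq[k+1]'h) := by
    have e : ((k : Int) + 1) = ((k + 1 : Nat) : Int) := by push_cast; ring
    rw [e, PySem.List.pyGet?_natCast, List.getElem?_eq_getElem h]
  have e2 : PySem.List.pyGet? seq ((k : Int) + 1 - 1) = some (seq[k]'h0) := by
    have e : ((k : Int) + 1 - 1) = ((k : Nat) : Int) := by ring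
    rw [e, PySem.List.pyGet?_natCast, List.getElem?_eq_getElem h0]
  simp only [okA, pvIdxA, e1, e2, Option.getD_some, Bool.and_eq_true, decide_eq_true_eq]
  omega

-- the outer-loop all over range(1, len) says exactly pairsOk
lemma rangeAll_iff_pairsOk (seq : List Int) (tol : Int) :
    (PySem.List.pyRange 1 (seq.length : Int) 1).all (okA seq tol) = true ↔ pairsOk seq tol := by
  rw [List.all_eq_true]
  constructor
  · intro h k hk
    rw [← okA_iff seq tol k hk]
    apply h
    rw [PySem.List.mem_pyRange_one]
    omega
  · intro h i hi
    rw [PySem.List.mem_pyRange_one] at hi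
    have hk : (i - 1).toNat + 1 < seq.length := by omega
    have hei : ((((i - 1).toNat : Int)) + 1) = i := by omega
    rw [← hei, okA_iff seq tol _ hk]
    exact h _ hk

-- a deletion away from the violating pair (i, i+1) cannot repair it
lemma erase_far_not_ok (seq : List Int) (tol : Int) (i j : Nat)
    (hi : i + 1 < seq.length)
    (hbad : ¬(seq[i]'(by omega) < seq[i+1]'hi ∧ seq[i+1]'hi ≤ seq[i]'(by omega) + tol))
    (hj : j < seq.length) (hji : j ≠ i) (hji1 : j ≠ i + 1) :
    ¬ pairsOk (seq.eraseIdx j) tol := by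
  intro hall
  have hlen : (seq.eraseIdx j).length = seq.length - 1 := by
    rw [List.length_eraseIdx_of_lt hj]
  rcases Nat.lt_or_ge j i with hlt | hge
  · -- j < i : the pair sits at positions (m, m+1) of the erased list, where i = m+1
    obtain ⟨m, rfl⟩ : ∃ m, i = m + 1 := ⟨i - 1, by omega⟩
    have h1 : m + 1 < (seq.eraseIdx j).length := by omega
    have this1 := hall m h1
    have e1 : (seq.eraseIdx j)[m]'(by omega) = seq[m+1]'(by omega) :=
      List.getElem_eraseIdx_of_ge _ (by omega)
    have e2 : (seq.eraseIdx j)[m+1]'(by omega) = seq[m+1+1]'(by omega) :=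
      List.getElem_eraseIdx_of_ge _ (by omega)
    rw [e1, e2] at this1
    exact hbad this1
  · -- j > i+1 : the pair still sits at positions (i, i+1)
    have hgt : i + 1 < j := by omega
    have h1 : i + 1 < (seq.eraseIdx j).length := by omega
    have this1 := hall i h1
    have e1 : (seq.eraseIdx j)[i]'(by omega) = seq[i]'(by omega) :=
      List.getElem_eraseIdx_of_lt _ (by omega)
    have e2 : (seq.eraseIdx j)[i+1]'(by omega) = seq[i+1]'(by omega) :=
      List.getElem_eraseIdx_of_lt _ (by omega)
    rw [e1, e2] at this1
    exact hbad this1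

-- the inner check on a deleted copy is _first_violation(...) is None
lemma inner_eq_isNone (seq : List Int) (tol : Int) (j : Int) :
    goA (seq.eraseIdx j.toNat) tol false
        (PySem.List.pyRange 1 ((seq.eraseIdx j.toNat).length : Int) 1)
      = (firstViolation (seq.eraseIdx j.toNat) tol).isNone := by
  rw [goA_eq_all, Bool.eq_iff_iff]
  constructor
  · intro h
    rw [Option.isNone_iff_eq_none, firstViolation_none_iff, ← rangeAll_iff_pairsOk]
    by_cases hall : (PySem.List.pyRange 1 ((seq.eraseIdx j.toNat).length : Int) 1).all
        (okA (seq.eraseIdx j.toNat) tol) = true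
    · exact hall
    · rw [if_neg hall] at h; exact absurd h (by simp)
  · intro h
    rw [Option.isNone_iff_eq_none, firstViolation_none_iff, ← rangeAll_iff_pairsOk] at h
    rw [if_pos h]

-- the 'any over all deletions' equals testing only the two endpoint deletions
lemma any_erase_eq (seq : List Int) (tol : Int) (i : Nat)
    (hfv : firstViolation seq tol = some i) :
    ((PySem.List.pyRange 0 (seq.length : Int) 1).any (fun j =>
        (firstViolation (seq.eraseIdx j.toNat) tol).isNone))
      = ((firstViolation (seq.eraseIdx i) tol).isNone ||
         (firstViolation (seq.eraseIdx (i + 1)) tol).isNone) := by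
  obtain ⟨hi, hbad⟩ := firstViolation_some seq tol i hfv
  rw [Bool.eq_iff_iff, List.any_eq_true, Bool.or_eq_true]
  constructor
  · rintro ⟨j, hjm, hj⟩
    rw [PySem.List.mem_pyRange_one] at hjm
    have hjn : j.toNat < seq.length := by omega
    by_cases h1 : j.toNat = i
    · left; rwa [h1] at hj
    by_cases h2 : j.toNat = i + 1
    · right; rwa [h2] at hj
    rw [Option.isNone_iff_eq_none, firstViolation_none_iff] at hj
    exact absurd hj (erase_far_not_ok seq tol i j.toNat hi hbad hjn h1 h2)
  · rintro (h | h)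
    · exact ⟨(i : Int), by rw [PySem.List.mem_pyRange_one]; omega, by simpa using h⟩
    · exact ⟨((i + 1 : Nat) : Int), by rw [PySem.List.mem_pyRange_one]; omega, by simpa using h⟩

-- ===== VERDICT (by name: the statement is the Claim_ definition above) =====
theorem valid_asc_spec : Claim_equal_valid_asc := by
  intro seq tol skip _
  unfold Spec_valid_asc valid_asc valid_asc_alt
  rw [goA_eq_all]
  cases hfv : firstViolation seq tol with
  | none =>
    rw [firstViolation_none_iff, ← rangeAll_iff_pairsOk] at hfv
    rw [if_pos hfv]
  | some i =>
    have hne : ¬ ((PySem.List.pyRange 1 (seq.length : Int) 1).all (okA seq tol) = true) := by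
      rw [rangeAll_iff_pairsOk, ← firstViolation_none_iff, hfv]
      simp
    rw [if_neg hne]
    cases skip with
    | false => simp
    | true =>
      simp only [if_true]
      rw [List.any_congr rfl (fun j => inner_eq_isNone seq tol j), any_erase_eq seq tol i hfv]
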